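-- pv_equiv track=rewrite | github.com/halfendt/Codewars | 6_kyu/encrypt_this.py | encrypt_this
-- ===== SOURCE A (Python) =====
-- def encrypt_this(text):
--     """
--     Encrypt this! Kata
--     https://www.codewars.com/kata/5848565e273af816fb000449
--     """
--     res = []
--     for word in text.split():
--         if len(word) == 1:
--             res.append(f'{ord(word[0])}')
--         elif len(word) == 2:
--             res.append(f'{ord(word[0])}{word[1]}')
--         else:
--             res.append(f'{ord(word[0])}{word[-1]}{word[2:-1]}{word[1]}')
--     return ' '.join(res)
-- ===== SOURCE B (Python) =====
-- def encrypt_this(text):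
--     out = []
--     i, n = 0, len(text)
--     while i < n:
--         if text[i].isspace():
--             i += 1
--         else:
--             j = i
--             while j < n and not text[j].isspace():
--                 j += 1
--             if out:
--                 out.append(' ')
--             tail = text[i + 1:j]
--             if len(tail) >= 2:
--                 enc = str(ord(text[i])) + tail[-1] + tail[1:-1] + tail[0]
--             else:
--                 enc = str(ord(text[i])) + tail
--             out.append(enc)
--             i = j
--     return ''.join(out)
-- ===== Notes on version B (the rewrite author's own statement) =====
-- stated objective: alternative
-- what changed: B drops split()/the word list entirely: a single index-based scanner walks the characters once, finds each word's boundaries in place, emits the separator and the encoded word (ord of head, then tail[-1]+tail[1:-1]+tail[0] by slicing) into one flat piece list joined once at the end, instead of A's loop over text.split() with a three-way length branch per word.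
import Mathlib
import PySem

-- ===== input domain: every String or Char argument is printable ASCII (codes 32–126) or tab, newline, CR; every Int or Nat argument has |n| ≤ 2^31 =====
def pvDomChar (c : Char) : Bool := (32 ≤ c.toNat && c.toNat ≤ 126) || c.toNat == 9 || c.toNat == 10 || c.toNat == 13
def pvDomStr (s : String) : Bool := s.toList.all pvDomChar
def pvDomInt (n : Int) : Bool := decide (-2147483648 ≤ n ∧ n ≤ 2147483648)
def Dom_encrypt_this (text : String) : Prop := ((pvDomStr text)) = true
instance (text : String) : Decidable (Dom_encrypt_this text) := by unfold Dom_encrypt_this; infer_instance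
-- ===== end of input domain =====

-- B replaces A's text.split() word loop with a single manual character scanner that finds
-- word boundaries in place and emits flat output pieces (objective: alternative decomposition).

-- ===== PORT A =====
-- one word of A's loop body: the three-way branch on len(word)
def encWordA (w : List Char) : List Char :=
  if PySem.Chars.len w = 1 then
    PySem.Int.toChars ((PySem.List.pyGetD w 0 ' ').toNat)
  else if PySem.Chars.len w = 2 then
    PySem.Int.toChars ((PySem.List.pyGetD w 0 ' ').toNat) ++ [PySem.List.pyGetD w 1 ' ']
  else
    PySem.Int.toChars ((PySem.List.pyGetD w 0 ' ').toNat) ++ [PySem.List.pyGetD w (-1) ' ']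
      ++ PySem.List.slice w (some 2) (some (-1)) ++ [PySem.List.pyGetD w 1 ' ']

def encrypt_this (text : String) : String :=
  String.ofList (PySem.Chars.join [' ']
    ((PySem.Chars.split₀ text.toList).foldl (fun res w => res ++ [encWordA w]) []))

-- ===== PORT B =====
-- B's inner `while j < n and not text[j].isspace(): j += 1`: the word chars and the remainder
def takeWord : List Char → List Char × List Char
  | [] => ([], [])
  | c :: cs =>
    if PySem.Chars.isspace c then ([], c :: cs)
    else ((c :: (takeWord cs).1), (takeWord cs).2)

-- termination helper for scanB
lemma takeWord_snd_le (cs : List Char) : ((takeWord cs).2).length ≤ cs.length := by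
  induction cs with
  | nil => simp [takeWord]
  | cons c cs ih =>
    simp only [takeWord]
    split
    · simp
    · simpa using Nat.le_succ_of_le ih

-- `enc = str(ord(text[i])) + (tail[-1] + tail[1:-1] + tail[0]  if len(tail) >= 2 else tail)`
def encB (c : Char) (tail : List Char) : List Char :=
  if 2 ≤ PySem.Chars.len tail then
    PySem.Int.toChars c.toNat ++ [PySem.List.pyGetD tail (-1) ' ']
      ++ PySem.List.slice tail (some 1) (some (-1)) ++ [PySem.List.pyGetD tail 0 ' ']
  else
    PySem.Int.toChars c.toNat ++ tail

-- B's outer `while i < n` scanner accumulating the flat piece list `out`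
def scanB : List Char → List (List Char) → List (List Char)
  | [], out => out
  | c :: rest, out =>
    if h : PySem.Chars.isspace c then scanB rest out
    else
      scanB (takeWord (c :: rest)).2
        ((out ++ if out.isEmpty then [] else [[' ']]) ++ [encB c (takeWord (c :: rest)).1.tail])
termination_by cs out => cs.length
decreasing_by
  · simp
  · simp only [takeWord, if_neg h]
    exact Nat.lt_succ_of_le (takeWord_snd_le rest)

def encrypt_this_alt (text : String) : String :=
  String.ofList (PySem.Chars.join [] (scanB text.toList []))

-- ===== PRECONDITION & SPEC =====
def Spec_encrypt_this (text : String) (out : String) : Prop := out = encrypt_this_alt text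
instance (text : String) (out : String) : Decidable (Spec_encrypt_this text out) := by unfold Spec_encrypt_this; infer_instance

-- ===== CLAIM (what is proved, stated in full; the proofs are below) =====
def Claim_equal_encrypt_this : Prop := ∀ (text : String), Dom_encrypt_this text → Spec_encrypt_this text (encrypt_this text)

-- ===== LEMMAS AND PROOFS =====

-- ''.join = flatten
lemma join_nil_eq_flatten (parts : List (List Char)) :
    PySem.Chars.join [] parts = parts.flatten := by
  induction parts with
  | nil => simp [PySem.Chars.join, List.intercalate]
  | cons x xs ih =>
    cases xs with
    | nil => simp [PySem.Chars.join, List.intercalate]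
    | cons y ys =>
      simp only [PySem.Chars.join, List.intercalate] at *
      simp [List.intersperse] at *
      simp [ih]

-- ' '.join, one word at a time
lemma join_cons (x : List Char) (xs : List (List Char)) :
    PySem.Chars.join [' '] (x :: xs)
      = x ++ (if xs.isEmpty then [] else [' '] ++ PySem.Chars.join [' '] xs) := by
  cases xs with
  | nil => simp [PySem.Chars.join, List.intercalate]
  | cons y ys => simp [PySem.Chars.join, List.intercalate, List.intersperse]

-- every word produced by str.split() is nonempty
lemma split₀_go_ne_nil (s : List Char) : ∀ (cur : List Char) (acc : List (List Char)),
    (∀ w ∈ acc, w ≠ []) → ∀ w ∈ PySem.Chars.split₀.go s cur acc, w ≠ [] := by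
  induction s with
  | nil =>
    intro cur acc hacc w hw
    simp [PySem.Chars.split₀.go] at hw
    split at hw
    · exact hacc w (by simpa using hw)
    · rcases (by simpa using hw : w ∈ acc ∨ w = cur.reverse) with h | h
      · exact hacc w h
      · subst h; simpa using ‹¬ cur = []›
  | cons c rest ih =>
    intro cur acc hacc w hw
    simp only [PySem.Chars.split₀.go] at hw
    split at hw
    · split at hw
      · exact ih [] acc hacc w hw
      · refine ih [] (cur.reverse :: acc) ?_ w hw
        intro v hv
        rcases List.mem_cons.mp hv with h | h
        · subst h; simpa [List.isEmpty_iff] using ‹¬ cur.isEmpty = true›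
        · exact hacc v h
    · exact ih (c :: cur) acc hacc w hw

lemma split₀_ne_nil (s : List Char) : ∀ w ∈ PySem.Chars.split₀ s, w ≠ [] := by
  exact split₀_go_ne_nil s [] [] (by simp)

-- split₀.go ignores a prefix already consumed by takeWord
lemma split₀_go_takeWord (cs : List Char) : ∀ (cur : List Char) (acc : List (List Char)),
    PySem.Chars.split₀.go cs cur acc
      = PySem.Chars.split₀.go (takeWord cs).2 ((takeWord cs).1.reverse ++ cur) acc := by
  induction cs with
  | nil => intro cur acc; simp [takeWord]
  | cons c cs ih =>
    intro cur acc
    by_cases h : PySem.Chars.isspace c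
    · simp [takeWord, h]
    · simp only [takeWord, if_neg h]
      rw [show PySem.Chars.split₀.go (c :: cs) cur acc = PySem.Chars.split₀.go cs (c :: cur) acc by
        simp [PySem.Chars.split₀.go, h]]
      rw [ih (c :: cur) acc]
      simp

-- the accumulator of split₀.go is a reversed prefix of the result
lemma split₀_go_acc (cs : List Char) : ∀ (cur : List Char) (acc : List (List Char)),
    PySem.Chars.split₀.go cs cur acc = acc.reverse ++ PySem.Chars.split₀.go cs cur [] := by
  induction cs with
  | nil =>
    intro cur acc
    by_cases h : cur.isEmpty <;> simp [PySem.Chars.split₀.go, h]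
  | cons c cs ih =>
    intro cur acc
    by_cases h : PySem.Chars.isspace c
    · by_cases hc : cur.isEmpty
      · simp only [PySem.Chars.split₀.go, h, if_pos hc, ite_true]
        exact ih [] acc
      · simp only [PySem.Chars.split₀.go, h, if_neg hc, ite_true]
        rw [ih [] (cur.reverse :: acc), ih [] [cur.reverse]]
        simp
    · simp only [PySem.Chars.split₀.go, h]
      exact ih (c :: cur) acc

-- the remainder left by takeWord is empty or starts with whitespace
lemma takeWord_snd_shape (cs : List Char) :
    (takeWord cs).2 = [] ∨ ∃ d r, (takeWord cs).2 = d :: r ∧ PySem.Chars.isspace d = true := by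
  induction cs with
  | nil => left; simp [takeWord]
  | cons c cs ih =>
    by_cases h : PySem.Chars.isspace c
    · right; exact ⟨c, cs, by simp [takeWord, h], h⟩
    · simpa [takeWord, h] using ih

lemma split₀_cons_space (c : Char) (rest : List Char) (h : PySem.Chars.isspace c = true) :
    PySem.Chars.split₀ (c :: rest) = PySem.Chars.split₀ rest := by
  simp [PySem.Chars.split₀, PySem.Chars.split₀.go, h]

lemma split₀_cons_word (c : Char) (rest : List Char) (h : ¬ PySem.Chars.isspace c = true) :
    PySem.Chars.split₀ (c :: rest)
      = (takeWord (c :: rest)).1 :: PySem.Chars.split₀ (takeWord (c :: rest)).2 := by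
  have hw : (takeWord (c :: rest)).1 = c :: (takeWord rest).1 := by simp [takeWord, h]
  have hr : (takeWord (c :: rest)).2 = (takeWord rest).2 := by simp [takeWord, h]
  rw [show PySem.Chars.split₀ (c :: rest)
      = PySem.Chars.split₀.go (c :: rest) [] [] from rfl,
    split₀_go_takeWord (c :: rest) [] []]
  rcases takeWord_snd_shape (c :: rest) with h2 | ⟨d, r, h2, hd⟩
  · rw [h2]
    simp [PySem.Chars.split₀.go, hw, PySem.Chars.split₀]
  · rw [h2]
    simp only [PySem.Chars.split₀.go, hd, if_true, List.append_nil, hw]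
    rw [if_neg (by simp)]
    rw [split₀_go_acc r [] [(c :: (takeWord rest).1).reverse.reverse]]
    simp [PySem.Chars.split₀, PySem.Chars.split₀.go, hd]

-- B's encoded word, as a function of the whole word
def encW (w : List Char) : List Char := encB (w.headD ' ') w.tail

-- the scanner's flattened output = ' '.join of the encoded split words
lemma scanB_flatten : ∀ (cs : List Char) (out : List (List Char)),
    (scanB cs out).flatten
      = out.flatten
        ++ (if out.isEmpty || (PySem.Chars.split₀ cs).isEmpty then [] else [' '])
        ++ PySem.Chars.join [' '] ((PySem.Chars.split₀ cs).map encW) := by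
  intro cs out
  induction cs, out using scanB.induct with
  | case1 out => simp [scanB, PySem.Chars.split₀, PySem.Chars.split₀.go, PySem.Chars.join, List.intercalate]
  | case2 c rest out h ih =>
    rw [show scanB (c :: rest) out = scanB rest out by simp [scanB, h]]
    rw [split₀_cons_space c rest h]
    exact ih
  | case3 c rest out h ih =>
    rw [show scanB (c :: rest) out
        = scanB (takeWord (c :: rest)).2
            ((out ++ if out.isEmpty then [] else [[' ']]) ++ [encB c (takeWord (c :: rest)).1.tail]) by
      simp [scanB, h]]
    simp only [dite_eq_ite] at ih
    rw [ih]
    rw [split₀_cons_word c rest h]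
    have hw : (takeWord (c :: rest)).1 = c :: (takeWord rest).1 := by simp [takeWord, h]
    rw [List.map_cons, join_cons]
    have henc : encW (takeWord (c :: rest)).1 = encB c (takeWord (c :: rest)).1.tail := by
      rw [hw]; rfl
    rcases hsp : PySem.Chars.split₀ (takeWord (c :: rest)).2 with _ | ⟨w0, ws⟩ <;>
      rw [hsp] at ih <;> (try simp only [ih]) <;>
        by_cases ho : out.isEmpty <;>
          simp [ho, henc, PySem.Chars.join, List.intercalate, List.intersperse]

-- B's uniform tail encoding agrees with A's three-way branch on every nonempty word
lemma encWord_eq (w : List Char) (hw : w ≠ []) : encWordA w = encW w := by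
  obtain ⟨a, t, rfl⟩ := List.exists_cons_of_ne_nil hw
  match t with
  | [] => simp [encWordA, encW, encB, pysem, PySem.Chars.len]
  | [b] => simp [encWordA, encW, encB, pysem, PySem.Chars.len,
      PySem.List.pyGetD, PySem.List.pyGet?, PySem.List.pyIdx?]
  | b :: c :: u =>
    obtain ⟨mid, z, hmz⟩ := (c :: u).eq_nil_or_concat.resolve_left (by simp)
    rw [List.concat_eq_append] at hmz
    rw [hmz]
    simp only [encWordA, encW, encB, List.headD, List.tail]
    rw [show a :: b :: (mid ++ [z]) = a :: b :: mid ++ [z] by simp]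
    rw [show b :: (mid ++ [z]) = b :: mid ++ [z] by simp]
    rw [show PySem.Chars.len (a :: b :: mid ++ [z]) = mid.length + 3 by
      simp [PySem.Chars.len]; omega]
    rw [show PySem.Chars.len (b :: mid ++ [z]) = mid.length + 2 by
      simp [PySem.Chars.len]; omega]
    rw [if_neg (by omega), if_neg (by omega), if_pos (by omega)]
    have h01 : (0:Int) ≤ (mid.length:Int) + 1 := by positivity
    have h02 : (0:Int) ≤ (mid.length:Int) + 1 + 1 := by positivity
    have hgetA1 : PySem.List.pyGetD (a :: b :: mid ++ [z]) (-1) ' ' = z := by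
      rw [show a :: b :: mid ++ [z] = (a :: b :: mid) ++ [z] by simp,
        PySem.List.pyGetD_neg_one_append_singleton]
    have hgetB1 : PySem.List.pyGetD (b :: mid ++ [z]) (-1) ' ' = z := by
      rw [show b :: mid ++ [z] = (b :: mid) ++ [z] by simp,
        PySem.List.pyGetD_neg_one_append_singleton]
    have hsliceA : PySem.List.slice (a :: b :: mid ++ [z]) (some 2) (some (-1)) = mid := by
      simp [PySem.List.slice]
    have hsliceB : PySem.List.slice (b :: mid ++ [z]) (some 1) (some (-1)) = mid := by
      simp [PySem.List.slice]
    have hgetA0 : PySem.List.pyGetD (a :: b :: mid ++ [z]) 0 ' ' = a := by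
      simp [PySem.List.pyGetD, PySem.List.pyGet?, PySem.List.pyIdx?, h02]
    have hgetAb : PySem.List.pyGetD (a :: b :: mid ++ [z]) 1 ' ' = b := by
      simp [PySem.List.pyGetD, PySem.List.pyGet?, PySem.List.pyIdx?, h01]
    have hgetB0 : PySem.List.pyGetD (b :: mid ++ [z]) 0 ' ' = b := by
      simp [PySem.List.pyGetD, PySem.List.pyGet?, PySem.List.pyIdx?, h01]
    rw [hgetA1, hgetB1, hsliceA, hsliceB, hgetA0, hgetAb, hgetB0]

-- ===== VERDICT (by name: the statement is the Claim_ definition above) =====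
theorem encrypt_this_spec : Claim_equal_encrypt_this := by
  intro text _
  unfold Spec_encrypt_this encrypt_this encrypt_this_alt
  rw [PySem.List.foldl_append_singleton_eq_map, join_nil_eq_flatten, scanB_flatten]
  simp only [List.isEmpty_nil, Bool.true_or, if_true, List.flatten_nil, List.nil_append]
  congr 1
  refine congrArg _ (List.map_congr_left ?_)
  intro w hw
  exact encWord_eq w (split₀_ne_nil _ w hw)
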